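-- pv_equiv track=rewrite | github.com/granttremel/genomics | ggene/motifs/dyad_old.py | search_dyad
-- ===== SOURCE A (Python) =====
-- COMPLEMENT_MAP = {'A':'U','C':'G','G':'C','U':'A','N':'N'}
--
-- def compare_seqs(s1, s2, err_tol = None):
--
--     if not len(s1) == len(s2):
--         return len(s1)
--
--     if err_tol is None:
--         err_tol = len(s1)
--
--     nerr = 0
--     for a, b in zip(s1, s2):
--         if not a == b:
--             nerr += 1
--         if nerr > err_tol:
--             return nerr
--     return nerr
--
-- def reverse_complement(seq):
--     return "".join(_reverse(_complement(seq)))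
--
-- def _complement(seq):
--     return [COMPLEMENT_MAP.get(s,s) for s in seq]
--
-- def _reverse(seq):
--     return [s for s in reversed(seq)]
--
-- def search_dyad(seq, dyad_len, max_loop, min_loop, err_tol = 0):
--     """
--     dumb algorithm to find palindromes/dyads given their length
--     a dyad should be unique given a sequence.. right?
--     """
--
--     dyad_start = dyad_rc_start = loop_len = -1
--     n_loop_iters = max_loop - min_loop
--     n_dyad_iters = len(seq) - 2*dyad_len - min_loop
--
--     done = False
--     allres = []
--
--     for nd in range(n_dyad_iters):
--
--         test_seq = seq[nd:nd + dyad_len]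
--         test_seq_rc = "".join(reverse_complement(test_seq))
--
--         for nl in range(min_loop, max_loop+1):
--
--             comp_seq = seq[nd + dyad_len + nl:nd + 2*dyad_len + nl]
--             err = compare_seqs(test_seq_rc, comp_seq, err_tol = 0)
--
--             # if comp_seq == test_seq_rc:
--             if err < 1:
--                 done = True
--
--             if done:
--                 dyad_start = nd
--                 dyad_rc_start = nd + dyad_len + nl
--                 loop_len = dyad_rc_start - dyad_start - dyad_len
--                 break
--
--         if done:
--             break
--
--     return dyad_len, dyad_start, loop_len, dyad_rc_start
-- ===== SOURCE B (Python) =====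
-- COMPLEMENT_MAP = {'A':'U','C':'G','G':'C','U':'A','N':'N'}
--
-- def reverse_complement(seq):
--     return "".join(COMPLEMENT_MAP.get(c, c) for c in reversed(seq))
--
-- def search_dyad(seq, dyad_len, max_loop, min_loop, err_tol = 0):
--     # Index every fixed-length window of the sequence by its content, once.
--     # A candidate dyad then costs one dictionary lookup plus a scan of the
--     # ascending position list for the first hit inside the allowed loop range.
--     index = {}
--     for p in range(len(seq) - dyad_len + 1):
--         index.setdefault(seq[p:p + dyad_len], []).append(p)
--     for nd in range(len(seq) - 2 * dyad_len - min_loop):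
--         needle = reverse_complement(seq[nd:nd + dyad_len])
--         lo = nd + dyad_len + min_loop
--         hi = nd + dyad_len + max_loop
--         for p in index.get(needle, ()):
--             if p > hi:
--                 break
--             if p >= lo:
--                 return dyad_len, nd, p - nd - dyad_len, p
--     return dyad_len, -1, -1, -1
-- ===== Notes on version B (the rewrite author's own statement) =====
-- stated objective: alternative
-- what changed: B builds a dictionary indexing every fixed-length window of the sequence by its content once, so A's inner scan over loop lengths (building a reverse complement and running a per-character mismatch-count per candidate loop length) becomes one lookup plus a scan of the ascending position list; Pre_ excludes non-positive dyad_len and min_loop < -dyad_len, where A returns values only through accidental slice arithmetic (empty windows 'match' immediately and negative window starts wrap to the end of the sequence).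
-- outside the precondition, e.g. on search_dyad('AUGCAU', 2, 3, -8, 0): A returns (2, 0, -8, -6), B returns (2, 0, -2, 0); on search_dyad('UGC', -3, 6, -4, 0): A returns (-3, 0, -4, -7), B returns (-3, 0, 3, 0)
import Mathlib
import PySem

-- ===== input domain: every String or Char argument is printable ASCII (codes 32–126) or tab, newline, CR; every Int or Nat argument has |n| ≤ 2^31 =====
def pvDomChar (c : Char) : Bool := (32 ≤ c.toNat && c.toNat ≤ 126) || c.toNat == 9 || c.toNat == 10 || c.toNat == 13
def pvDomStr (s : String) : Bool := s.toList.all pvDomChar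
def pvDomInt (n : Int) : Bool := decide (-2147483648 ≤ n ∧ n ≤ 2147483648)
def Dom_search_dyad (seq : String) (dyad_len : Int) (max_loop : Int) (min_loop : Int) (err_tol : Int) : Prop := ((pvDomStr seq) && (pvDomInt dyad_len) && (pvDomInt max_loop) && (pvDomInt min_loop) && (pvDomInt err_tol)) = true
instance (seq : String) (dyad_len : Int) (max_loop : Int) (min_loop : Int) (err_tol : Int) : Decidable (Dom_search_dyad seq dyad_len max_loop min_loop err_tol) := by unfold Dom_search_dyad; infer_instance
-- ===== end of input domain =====

-- B builds a dictionary index of all fixed-length windows of the sequence once,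
-- so A's inner scan over loop lengths (one reverse-complement comparison per
-- candidate loop length) becomes one lookup plus a scan of the ascending
-- position list for the first hit inside the allowed window.
-- The Python return value is a 4-tuple of ints, ported as List Int.

-- ===== PORT A =====

-- COMPLEMENT_MAP = {'A':'U','C':'G','G':'C','U':'A','N':'N'}
def COMPLEMENT_MAP : PySem.Dict Char Char :=
  (((((PySem.Dict.empty).insert 'A' 'U').insert 'C' 'G').insert 'G' 'C').insert 'U' 'A').insert 'N' 'N'

-- the 'for a, b in zip(s1, s2)' loop of compare_seqs, with its early return
def compare_seqs_loop (err_tol : Int) : List (Char × Char) → Int → Int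
  | [], nerr => nerr
  | (a, b) :: rest, nerr =>
    let nerr' := if a == b then nerr else nerr + 1
    if err_tol < nerr' then nerr' else compare_seqs_loop err_tol rest nerr'

def compare_seqs (s1 s2 : List Char) (err_tol : Option Int) : Int :=
  if ¬ ((s1.length : Int) = (s2.length : Int)) then (s1.length : Int)
  else
    let et := err_tol.getD (s1.length : Int)
    compare_seqs_loop et (s1.zip s2) 0

def pyComplement (seq : List Char) : List Char :=
  seq.map (fun s => COMPLEMENT_MAP.getD s s)

def pyReverse (seq : List Char) : List Char := seq.reverse

-- "".join(_reverse(_complement(seq)))  (join over chars = the char list itself)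
def reverse_complement (seq : List Char) : List Char := pyReverse (pyComplement seq)

-- inner 'for nl in range(min_loop, max_loop+1)' loop: first nl where done is set.
-- Python's range is lazy, so the loop is ported as recursion on the remaining
-- iteration count with nl as the running range value.
def search_dyad_innerA (s : List Char) (d nd : Int) (test_seq_rc : List Char) :
    Int → Nat → Option Int
  | _, 0 => none
  | nl, k + 1 =>
    let comp_seq := PySem.List.slice s (some (nd + d + nl)) (some (nd + 2 * d + nl))
    let err := compare_seqs test_seq_rc comp_seq (some 0)
    if err < 1 then some nl else search_dyad_innerA s d nd test_seq_rc (nl + 1) k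

-- outer 'for nd in range(n_dyad_iters)' loop with the done/break bookkeeping
def search_dyad_outerA (s : List Char) (d max_loop min_loop : Int) :
    Int → Nat → List Int
  | _, 0 => [d, -1, -1, -1]
  | nd, k + 1 =>
    let test_seq := PySem.List.slice s (some nd) (some (nd + d))
    let test_seq_rc := reverse_complement test_seq
    match search_dyad_innerA s d nd test_seq_rc min_loop ((max_loop + 1) - min_loop).toNat with
    | some nl =>
      let dyad_start := nd
      let dyad_rc_start := nd + d + nl
      let loop_len := dyad_rc_start - dyad_start - d
      [d, dyad_start, loop_len, dyad_rc_start]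
    | none => search_dyad_outerA s d max_loop min_loop (nd + 1) k

def search_dyad (seq : String) (dyad_len : Int) (max_loop : Int) (min_loop : Int) (err_tol : Int) : List Int :=
  let s := seq.toList
  let n_dyad_iters := (s.length : Int) - 2 * dyad_len - min_loop
  search_dyad_outerA s dyad_len max_loop min_loop 0 n_dyad_iters.toNat

-- ===== PORT B =====

-- B's reverse_complement: "".join(COMPLEMENT_MAP.get(c, c) for c in reversed(seq))
def reverse_complementB (seq : List Char) : List Char :=
  seq.reverse.map (fun c => COMPLEMENT_MAP.getD c c)

-- index = {}; for p in range(len(seq)-dyad_len+1): index.setdefault(seq[p:p+dyad_len], []).append(p)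
def buildIdx (s : List Char) (d : Int) : PySem.Dict (List Char) (List Int) :=
  (PySem.List.pyRange 0 ((s.length : Int) - d + 1) 1).foldl
    (fun idx p => idx.modify (PySem.List.slice s (some p) (some (p + d))) [] (· ++ [p]))
    PySem.Dict.empty

-- 'for p in index.get(needle, ()): if p > hi: break; if p >= lo: return …'
def scanB : List Int → Int → Int → Option Int
  | [], _, _ => none
  | p :: rest, lo, hi =>
    if hi < p then none
    else if lo ≤ p then some p
    else scanB rest lo hi

-- outer 'for nd in range(len(seq) - 2*dyad_len - min_loop)' loop of B
def search_dyad_outerB (s : List Char) (idx : PySem.Dict (List Char) (List Int))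
    (d max_loop min_loop : Int) : Int → Nat → List Int
  | _, 0 => [d, -1, -1, -1]
  | nd, k + 1 =>
    let needle := reverse_complementB (PySem.List.slice s (some nd) (some (nd + d)))
    match scanB (idx.getD needle []) (nd + d + min_loop) (nd + d + max_loop) with
    | some p => [d, nd, p - nd - d, p]
    | none => search_dyad_outerB s idx d max_loop min_loop (nd + 1) k

def search_dyad_alt (seq : String) (dyad_len : Int) (max_loop : Int) (min_loop : Int) (err_tol : Int) : List Int :=
  let s := seq.toList
  let idx := buildIdx s dyad_len
  search_dyad_outerB s idx dyad_len max_loop min_loop 0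
    ((s.length : Int) - 2 * dyad_len - min_loop).toNat

-- ===== PRECONDITION & SPEC =====
-- Pre_ excludes non-positive dyad_len and min_loop < -dyad_len, on which A still
-- returns values but only through accidental slice arithmetic: empty dyad windows
-- "match" immediately (compare_seqs of two empty strings is 0) and negative window
-- starts wrap around to the end of the sequence; B indexes genuine fixed-length
-- windows and does the natural thing there.
def Pre_search_dyad (seq : String) (dyad_len : Int) (max_loop : Int) (min_loop : Int) (err_tol : Int) : Prop :=
  0 < dyad_len ∧ 0 ≤ dyad_len + min_loop
instance (seq : String) (dyad_len : Int) (max_loop : Int) (min_loop : Int) (err_tol : Int) : Decidable (Pre_search_dyad seq dyad_len max_loop min_loop err_tol) := by unfold Pre_search_dyad; infer_instance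

def pvWitness_search_dyad : String × Int × Int × Int × Int := ("GGGAAACCC", 3, 4, 2, 0)

def Spec_search_dyad (seq : String) (dyad_len : Int) (max_loop : Int) (min_loop : Int) (err_tol : Int) (out : List Int) : Prop := out = search_dyad_alt seq dyad_len max_loop min_loop err_tol
instance (seq : String) (dyad_len : Int) (max_loop : Int) (min_loop : Int) (err_tol : Int) (out : List Int) : Decidable (Spec_search_dyad seq dyad_len max_loop min_loop err_tol out) := by unfold Spec_search_dyad; infer_instance

-- ===== CLAIM (what is proved, stated in full; the proofs are below) =====
def Claim_equal_search_dyad : Prop := ∀ (seq : String) (dyad_len : Int) (max_loop : Int) (min_loop : Int) (err_tol : Int), Dom_search_dyad seq dyad_len max_loop min_loop err_tol → Pre_search_dyad seq dyad_len max_loop min_loop err_tol → Spec_search_dyad seq dyad_len max_loop min_loop err_tol (search_dyad seq dyad_len max_loop min_loop err_tol)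

-- ===== LEMMAS AND PROOFS =====

-- A's mismatch-counting loop with budget 0 answers "< 1" exactly when every pair agrees
theorem compare_seqs_loop_lt_one (ps : List (Char × Char)) :
    (compare_seqs_loop 0 ps 0 < 1 ↔ ∀ p ∈ ps, p.1 = p.2) := by
  induction ps with
  | nil => simp [compare_seqs_loop]
  | cons p rest ih =>
    obtain ⟨a, b⟩ := p
    by_cases h : a = b
    · simpa [compare_seqs_loop, h] using ih
    · simp [compare_seqs_loop, h]

-- pointwise agreement of equally long lists is equality
theorem zip_all_eq {s1 s2 : List Char} (h : s1.length = s2.length) :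
    ((∀ p ∈ s1.zip s2, p.1 = p.2) ↔ s1 = s2) := by
  induction s1 generalizing s2 with
  | nil => cases s2 <;> simp_all
  | cons a t ih =>
    cases s2 with
    | nil => simp_all
    | cons b u =>
      simp only [List.length_cons, Nat.add_right_cancel_iff] at h
      simp only [List.zip_cons_cons, List.mem_cons, List.cons.injEq]
      constructor
      · intro hp
        refine ⟨by simpa using hp (a, b) (Or.inl rfl), (ih h).1 ?_⟩
        intro p hp'
        exact hp p (Or.inr hp')
      · rintro ⟨rfl, rfl⟩ p hp
        rcases hp with rfl | hp
        · rfl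
        · exact (ih h).2 rfl p hp

-- A's acceptance test 'compare_seqs(rc, comp, err_tol=0) < 1' with a nonempty rc
-- is exactly 'the window equals rc'
theorem compare_seqs_lt_one (rc comp : List Char) (hne : rc ≠ []) :
    (compare_seqs rc comp (some 0) < 1 ↔ comp = rc) := by
  unfold compare_seqs
  by_cases h : rc.length = comp.length
  · rw [if_neg (by simpa using h)]
    simp only [Option.getD_some]
    rw [compare_seqs_loop_lt_one, zip_all_eq h]
    exact ⟨fun hr => hr.symm, fun hr => hr.symm⟩
  · rw [if_pos (by simpa using h)]
    constructor
    · intro hl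
      exact absurd (List.length_eq_zero_iff.mp (by omega)) hne
    · rintro rfl; omega

-- two strictly increasing integer lists with the same members are equal
theorem pairwise_lt_ext : ∀ {l₁ l₂ : List Int}, l₁.Pairwise (· < ·) → l₂.Pairwise (· < ·) →
    (∀ x, x ∈ l₁ ↔ x ∈ l₂) → l₁ = l₂
  | [], [], _, _, _ => rfl
  | [], b :: u, _, _, hm => absurd ((hm b).mpr (List.mem_cons_self)) (List.not_mem_nil)
  | a :: t, [], _, _, hm => absurd ((hm a).mp (List.mem_cons_self)) (List.not_mem_nil)
  | a :: t, b :: u, h₁, h₂, hm => by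
    obtain ⟨ha, h₁'⟩ := List.pairwise_cons.mp h₁
    obtain ⟨hb, h₂'⟩ := List.pairwise_cons.mp h₂
    have hab : a = b := by
      rcases List.mem_cons.mp ((hm a).mp List.mem_cons_self) with h | h
      · exact h
      · rcases List.mem_cons.mp ((hm b).mpr List.mem_cons_self) with h' | h'
        · exact h'.symm
        · exact absurd (hb a h) (by have := ha b h'; omega)
    subst hab
    have hmem : ∀ x, x ∈ t ↔ x ∈ u := by
      intro x
      constructor
      · intro hx
        rcases List.mem_cons.mp ((hm x).mp (List.mem_cons_of_mem _ hx)) with h | h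
        · exact absurd (ha x hx) (by omega)
        · exact h
      · intro hx
        rcases List.mem_cons.mp ((hm x).mpr (List.mem_cons_of_mem _ hx)) with h | h
        · exact absurd (hb x hx) (by omega)
        · exact h
    exact congrArg (a :: ·) (pairwise_lt_ext h₁' h₂' hmem)

-- B's index-building fold, looked up at any key, collects the positions whose
-- window equals the key, in ascending order of insertion
theorem buildIdx_fold_getD (s : List Char) (d : Int) (key : List Char) :
    ∀ (L : List Int) (idx : PySem.Dict (List Char) (List Int)),
    (L.foldl (fun idx p =>
        idx.modify (PySem.List.slice s (some p) (some (p + d))) [] (· ++ [p])) idx).getD key []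
      = idx.getD key [] ++ L.filter (fun p => PySem.List.slice s (some p) (some (p + d)) == key)
  | [], idx => by simp
  | p :: L, idx => by
    simp only [List.foldl_cons, List.filter_cons]
    rw [buildIdx_fold_getD s d key L]
    by_cases h : PySem.List.slice s (some p) (some (p + d)) = key
    · rw [PySem.Dict.getD_modify]
      simp [h]
    · rw [PySem.Dict.getD_modify]
      have hb : (PySem.List.slice s (some p) (some (p + d)) == key) = false := by
        simpa using h
      rw [if_neg (fun hk => h hk.symm)]
      simp [hb]

theorem buildIdx_getD (s : List Char) (d : Int) (key : List Char) :
    (buildIdx s d).getD key [] =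
      (PySem.List.pyRange 0 ((s.length : Int) - d + 1) 1).filter
        (fun p => PySem.List.slice s (some p) (some (p + d)) == key) := by
  unfold buildIdx
  rw [buildIdx_fold_getD]
  simp

-- A's inner loop is the head of the filtered range of loop lengths
theorem innerA_eq_head (s : List Char) (d nd : Int) (rc : List Char) (hne : rc ≠ []) :
    ∀ (k : Nat) (nl : Int),
    search_dyad_innerA s d nd rc nl k =
      ((PySem.List.pyRange nl (nl + k) 1).filter
        (fun m => PySem.List.slice s (some (nd + d + m)) (some (nd + 2 * d + m)) == rc)).head? := by
  intro k
  induction k with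
  | zero => intro nl; simp [search_dyad_innerA, PySem.List.pyRange_one_eq_nil]
  | succ k ih =>
    intro nl
    have hcons : PySem.List.pyRange nl (nl + (k + 1 : Nat)) 1
        = nl :: PySem.List.pyRange (nl + 1) ((nl + 1) + k) 1 := by
      rw [PySem.List.pyRange_one_cons (by push_cast; omega)]
      congr 2
      push_cast; ring
    rw [hcons]
    simp only [search_dyad_innerA, List.filter_cons]
    by_cases h : compare_seqs rc (PySem.List.slice s (some (nd + d + nl)) (some (nd + 2 * d + nl))) (some 0) < 1
    · have hb : (PySem.List.slice s (some (nd + d + nl)) (some (nd + 2 * d + nl)) == rc) = true :=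
        beq_iff_eq.mpr ((compare_seqs_lt_one rc _ hne).mp h)
      simp [h, hb]
    · have hb : (PySem.List.slice s (some (nd + d + nl)) (some (nd + 2 * d + nl)) == rc) = false := by
        simp only [beq_eq_false_iff_ne, ne_eq]
        exact fun hc => h ((compare_seqs_lt_one rc _ hne).mpr hc)
      simp only [if_neg h, hb, Bool.false_eq_true, if_false]
      exact ih (nl + 1)

-- B's position scan over a strictly increasing list is the head of its in-window filter
theorem scanB_eq_head : ∀ (L : List Int), L.Pairwise (· < ·) → ∀ (lo hi : Int),
    scanB L lo hi = (L.filter (fun p => decide (lo ≤ p) && decide (p ≤ hi))).head?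
  | [], _, lo, hi => rfl
  | p :: rest, h, lo, hi => by
    obtain ⟨hp, h'⟩ := List.pairwise_cons.mp h
    simp only [scanB, List.filter_cons]
    by_cases h1 : hi < p
    · rw [if_pos h1]
      have hrest : rest.filter (fun p => decide (lo ≤ p) && decide (p ≤ hi)) = [] := by
        apply List.filter_eq_nil_iff.mpr
        intro q hq
        have := hp q hq
        simp only [Bool.and_eq_true, decide_eq_true_eq, not_and]
        omega
      have hpf : (decide (lo ≤ p) && decide (p ≤ hi)) = false := by
        simp only [Bool.and_eq_false_iff, decide_eq_false_iff_not]
        right; omega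
      simp [hpf, hrest]
    · rw [if_neg h1]
      by_cases h2 : lo ≤ p
      · rw [if_pos h2]
        have hpt : (decide (lo ≤ p) && decide (p ≤ hi)) = true := by
          simp only [Bool.and_eq_true, decide_eq_true_eq]
          omega
        simp [hpt]
      · rw [if_neg h2]
        have hpf : (decide (lo ≤ p) && decide (p ≤ hi)) = false := by
          simp only [Bool.and_eq_false_iff, decide_eq_false_iff_not]
          left; omega
        simp only [hpf, Bool.false_eq_true, if_false]
        exact scanB_eq_head rest h' lo hi

-- a full-length window forces its start inside the indexed range
theorem window_pos_bound {rc s : List Char} {d p : Int} (hp : 0 ≤ p) (hd : 0 < d)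
    (h : PySem.List.slice s (some p) (some (p + d)) = rc) (hrc : rc.length = d.toNat) :
    p < (s.length : Int) - d + 1 := by
  rw [PySem.List.slice_toNat s hp (by omega)] at h
  have hlen := congrArg List.length h
  simp only [List.length_take, List.length_drop] at hlen
  rw [hrc] at hlen
  omega

-- the key step: at one outer position nd, B's index lookup + scan returns exactly
-- the paired-window position A's inner loop finds (as an option, shifted by nd+d)
theorem step_eq (s : List Char) (d max_loop min_loop nd : Int)
    (hd : 0 < d) (hml : 0 ≤ d + min_loop) (hnd : 0 ≤ nd)
    (hnd2 : nd + d ≤ (s.length : Int)) :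
    scanB ((buildIdx s d).getD (reverse_complementB (PySem.List.slice s (some nd) (some (nd + d)))) [])
        (nd + d + min_loop) (nd + d + max_loop)
      = (search_dyad_innerA s d nd
          (reverse_complement (PySem.List.slice s (some nd) (some (nd + d))))
          min_loop ((max_loop + 1) - min_loop).toNat).map (fun nl => nd + d + nl) := by
  have hrcBA : reverse_complementB (PySem.List.slice s (some nd) (some (nd + d)))
      = reverse_complement (PySem.List.slice s (some nd) (some (nd + d))) := by
    simp [reverse_complementB, reverse_complement, pyReverse, pyComplement, List.map_reverse]
  set rc := reverse_complement (PySem.List.slice s (some nd) (some (nd + d))) with hrc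
  have hwlen : (PySem.List.slice s (some nd) (some (nd + d))).length = d.toNat := by
    rw [PySem.List.slice_toNat s hnd (by omega)]
    simp only [List.length_take, List.length_drop]
    omega
  have hrclen : rc.length = d.toNat := by
    simp [hrc, reverse_complement, pyReverse, pyComplement, hwlen]
  have hne : rc ≠ [] := by
    intro h
    rw [h] at hrclen
    simp at hrclen
    omega
  rw [hrcBA, buildIdx_getD]
  rw [scanB_eq_head _ ((PySem.List.pairwise_lt_pyRange_one 0 _).filter _)]
  rw [innerA_eq_head s d nd rc hne, ← List.head?_map]
  refine congrArg List.head? (pairwise_lt_ext ?_ ?_ ?_)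
  · exact ((PySem.List.pairwise_lt_pyRange_one 0 _).filter _).filter _
  · exact List.pairwise_map.mpr
      (((PySem.List.pairwise_lt_pyRange_one _ _).filter _).imp (by intro a b hab; omega))
  · intro x
    simp only [List.mem_filter, List.mem_map, PySem.List.mem_pyRange_one, beq_iff_eq,
      Bool.and_eq_true, decide_eq_true_eq]
    constructor
    · rintro ⟨⟨⟨hx0, hxN⟩, hq⟩, hlo, hhi⟩
      refine ⟨x - (nd + d), ⟨⟨by omega, by omega⟩, ?_⟩, by ring⟩
      have e1 : nd + d + (x - (nd + d)) = x := by ring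
      have e2 : nd + 2 * d + (x - (nd + d)) = x + d := by ring
      rw [e1, e2]
      exact hq
    · rintro ⟨m, ⟨⟨hm1, hm2⟩, hq⟩, hxm⟩
      have e1 : nd + d + m = x := hxm
      have e2 : nd + 2 * d + m = x + d := by omega
      rw [e1, e2] at hq
      have hx0 : (0 : Int) ≤ x := by omega
      have hxN : x < (s.length : Int) - d + 1 := window_pos_bound hx0 (by omega) hq hrclen
      exact ⟨⟨⟨hx0, hxN⟩, hq⟩, by omega, by omega⟩

-- the two outer loops agree step for step inside the iteration range
theorem outer_eq (s : List Char) (d max_loop min_loop : Int)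
    (hd : 0 < d) (hml : 0 ≤ d + min_loop) :
    ∀ (k : Nat) (nd : Int), 0 ≤ nd → nd + k ≤ (s.length : Int) - 2 * d - min_loop →
    search_dyad_outerA s d max_loop min_loop nd k
      = search_dyad_outerB s (buildIdx s d) d max_loop min_loop nd k := by
  intro k
  induction k with
  | zero => intro nd _ _; rfl
  | succ k ih =>
    intro nd hnd hk
    have hk' : (k : Int) + 1 = ((k + 1 : Nat) : Int) := by push_cast; ring
    have hnd2 : nd + d ≤ (s.length : Int) := by omega
    simp only [search_dyad_outerA, search_dyad_outerB]
    rw [step_eq s d max_loop min_loop nd hd hml hnd hnd2]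
    cases search_dyad_innerA s d nd
        (reverse_complement (PySem.List.slice s (some nd) (some (nd + d))))
        min_loop ((max_loop + 1) - min_loop).toNat with
    | none =>
      simp only [Option.map_none]
      exact ih (nd + 1) (by omega) (by omega)
    | some nl =>
      simp only [Option.map_some]

-- ===== VERDICT (by name: the statement is the Claim_ definition above) =====
theorem search_dyad_spec : Claim_equal_search_dyad := by
  intro seq dyad_len max_loop min_loop err_tol _ hpre
  obtain ⟨hd, hml⟩ := hpre
  simp only [Spec_search_dyad, search_dyad, search_dyad_alt]
  by_cases h : (seq.toList.length : Int) - 2 * dyad_len - min_loop ≤ 0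
  · rw [Int.toNat_of_nonpos h]
    rfl
  · exact outer_eq seq.toList dyad_len max_loop min_loop hd hml _ 0 le_rfl (by omega)
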